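-- pv_equiv track=rewrite | github.com/advancewarssami/hackathonFA2015 | backend.py | get_intermediate_times
-- ===== SOURCE A (Python) =====
-- def get_intermediate_times(all_times, start_time, end_time):
--     add = False
--     intermediate_times = []
--     for time in all_times:
--         if add:
--             if time == end_time:
--                 add = False
--             else:
--                 intermediate_times.append(time)
--         elif time == start_time:
--             add = True
--     return intermediate_times
-- ===== SOURCE B (Python) =====
-- def _after_first(x, xs):
--     """Suffix of xs after the first occurrence of x, or None if x not in xs."""
--     for i, y in enumerate(xs):
--         if y == x:
--             return xs[i + 1:]
--     return None
--
--
-- def _split_at_first(x, xs):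
--     """(prefix before first x, suffix after it or None if x not in xs)."""
--     for i, y in enumerate(xs):
--         if y == x:
--             return xs[:i], xs[i + 1:]
--     return xs, None
--
--
-- def get_intermediate_times(all_times, start_time, end_time):
--     out = []
--     xs = all_times
--     while True:
--         xs = _after_first(start_time, xs)
--         if xs is None:
--             return out
--         segment, xs = _split_at_first(end_time, xs)
--         out += segment
--         if xs is None:
--             return out
-- ===== Notes on version B (the rewrite author's own statement) =====
-- stated objective: alternative
-- what changed: Replaces A's per-element boolean-flag scan by a segment-jump loop: repeatedly find the next start marker, split the rest at the next end marker, append the segment and continue on the suffix.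
import Mathlib
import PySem

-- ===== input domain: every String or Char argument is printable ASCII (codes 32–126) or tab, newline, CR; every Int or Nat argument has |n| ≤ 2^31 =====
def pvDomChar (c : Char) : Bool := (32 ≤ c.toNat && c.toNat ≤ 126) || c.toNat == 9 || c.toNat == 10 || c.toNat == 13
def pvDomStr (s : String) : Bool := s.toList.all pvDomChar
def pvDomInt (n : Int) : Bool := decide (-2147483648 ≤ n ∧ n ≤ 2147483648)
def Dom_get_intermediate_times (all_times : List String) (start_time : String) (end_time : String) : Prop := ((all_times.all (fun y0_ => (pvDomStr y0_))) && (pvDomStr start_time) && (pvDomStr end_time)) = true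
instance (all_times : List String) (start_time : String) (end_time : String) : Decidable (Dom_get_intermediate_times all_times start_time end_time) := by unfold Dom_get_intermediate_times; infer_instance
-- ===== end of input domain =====

-- B replaces A's per-element boolean-flag scan by a segment-jump loop (find next start,
-- split at next end, append the segment, continue on the suffix); same cost, different structure.

-- ===== PORT A =====
-- flag loop: state (add, intermediate_times), one step per element
def get_intermediate_times (all_times : List String) (start_time : String) (end_time : String) : List String :=
  (all_times.foldl
    (fun (st : Bool × List String) time =>
      if st.1 then
        if time == end_time then (false, st.2) else (st.1, st.2 ++ [time])
      else if time == start_time then (true, st.2) else st)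
    (false, [])).2

-- ===== PORT B =====
-- _after_first: suffix after the first occurrence of x, or none
def pvAfterFirst (x : String) : List String → Option (List String)
  | [] => none
  | y :: ys => if y == x then some ys else pvAfterFirst x ys

-- _split_at_first: (prefix before first x, suffix after it or none)
def pvSplitAtFirst (x : String) : List String → List String × Option (List String)
  | [] => ([], none)
  | y :: ys =>
    if y == x then ([], some ys)
    else
      let r := pvSplitAtFirst x ys
      (y :: r.1, r.2)

theorem pvAfterFirst_length {x : String} : ∀ {xs ys : List String},
    pvAfterFirst x xs = some ys → ys.length < xs.length := by
  intro xs
  induction xs with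
  | nil => intro ys h; simp [pvAfterFirst] at h
  | cons a as ih =>
    intro ys h
    simp only [pvAfterFirst] at h
    split at h
    · cases h; simp
    · exact Nat.lt_trans (ih h) (by simp)

theorem pvSplitAtFirst_length {x : String} : ∀ {xs ys : List String},
    (pvSplitAtFirst x xs).2 = some ys → ys.length < xs.length := by
  intro xs
  induction xs with
  | nil => intro ys h; simp [pvSplitAtFirst] at h
  | cons a as ih =>
    intro ys h
    simp only [pvSplitAtFirst] at h
    split at h
    · cases h; simp
    · exact Nat.lt_trans (ih h) (by simp)

-- segment-jump loop (the Python while-loop as recursion on the remaining suffix)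
def get_intermediate_times_alt (all_times : List String) (start_time : String) (end_time : String) : List String :=
  match h : pvAfterFirst start_time all_times with
  | none => []
  | some rest =>
    match h2 : pvSplitAtFirst end_time rest with
    | (segment, none) => segment
    | (segment, some rest2) =>
      segment ++ get_intermediate_times_alt rest2 start_time end_time
termination_by all_times.length
decreasing_by
  exact Nat.lt_trans (pvSplitAtFirst_length (by rw [h2])) (pvAfterFirst_length h)

-- ===== PRECONDITION & SPEC =====
def Spec_get_intermediate_times (all_times : List String) (start_time : String) (end_time : String) (out : List String) : Prop := out = get_intermediate_times_alt all_times start_time end_time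
instance (all_times : List String) (start_time : String) (end_time : String) (out : List String) : Decidable (Spec_get_intermediate_times all_times start_time end_time out) := by unfold Spec_get_intermediate_times; infer_instance

-- ===== CLAIM (what is proved, stated in full; the proofs are below) =====
def Claim_equal_get_intermediate_times : Prop := ∀ (all_times : List String) (start_time : String) (end_time : String), Dom_get_intermediate_times all_times start_time end_time → Spec_get_intermediate_times all_times start_time end_time (get_intermediate_times all_times start_time end_time)

-- ===== LEMMAS AND PROOFS =====

-- A's loop body, named so the fold lemma can rewrite one step at a time
def fStep (s e : String) : Bool × List String → String → Bool × List String :=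
  fun st time =>
    if st.1 then
      if time == e then (false, st.2) else (st.1, st.2 ++ [time])
    else if time == s then (true, st.2) else st

-- pure characterisation of A's flag loop (no accumulator)
def runA (s e : String) : Bool → List String → List String
  | _, [] => []
  | true, t :: ts => if t == e then runA s e false ts else t :: runA s e true ts
  | false, t :: ts => if t == s then runA s e true ts else runA s e false ts

theorem foldA_eq (s e : String) : ∀ (xs : List String) (add : Bool) (acc : List String),
    (xs.foldl (fStep s e) (add, acc)).2 = acc ++ runA s e add xs := by
  intro xs
  induction xs with
  | nil => intro add acc; cases add <;> simp [runA]
  | cons t ts ih =>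
    intro add acc
    rw [List.foldl_cons]
    cases add with
    | false =>
      by_cases h : t = s
      · have hstep : fStep s e (false, acc) t = (true, acc) := by simp [fStep, h]
        rw [hstep, ih]; simp [runA, h]
      · have hstep : fStep s e (false, acc) t = (false, acc) := by simp [fStep, h]
        rw [hstep, ih]; simp [runA, h]
    | true =>
      by_cases h : t = e
      · have hstep : fStep s e (true, acc) t = (false, acc) := by simp [fStep, h]
        rw [hstep, ih]; simp [runA, h]
      · have hstep : fStep s e (true, acc) t = (true, acc ++ [t]) := by simp [fStep, h]
        rw [hstep, ih]; simp [runA, h]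

theorem runA_false (s e : String) : ∀ (xs : List String),
    runA s e false xs =
      match pvAfterFirst s xs with
      | none => []
      | some rest => runA s e true rest := by
  intro xs
  induction xs with
  | nil => simp [runA, pvAfterFirst]
  | cons t ts ih =>
    by_cases h : t == s <;> simp [runA, pvAfterFirst, h, ih]

theorem runA_true (s e : String) : ∀ (xs : List String),
    runA s e true xs =
      (pvSplitAtFirst e xs).1 ++
        (match (pvSplitAtFirst e xs).2 with
         | none => []
         | some rest => runA s e false rest) := by
  intro xs
  induction xs with
  | nil => simp [runA, pvSplitAtFirst]
  | cons t ts ih =>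
    by_cases h : t == e <;> simp [runA, pvSplitAtFirst, h, ih]

theorem alt_none {xs : List String} {s e : String} (h : pvAfterFirst s xs = none) :
    get_intermediate_times_alt xs s e = [] := by
  rw [get_intermediate_times_alt]
  split <;> simp_all

theorem alt_some_none {xs rest seg : List String} {s e : String}
    (hA : pvAfterFirst s xs = some rest) (hS : pvSplitAtFirst e rest = (seg, none)) :
    get_intermediate_times_alt xs s e = seg := by
  rw [get_intermediate_times_alt]
  split
  · simp_all
  · rename_i rest' heq
    rw [heq] at hA
    injection hA with h'
    subst h'
    split <;> simp_all

theorem alt_some_some {xs rest seg r2 : List String} {s e : String}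
    (hA : pvAfterFirst s xs = some rest) (hS : pvSplitAtFirst e rest = (seg, some r2)) :
    get_intermediate_times_alt xs s e = seg ++ get_intermediate_times_alt r2 s e := by
  rw [get_intermediate_times_alt]
  split
  · simp_all
  · rename_i rest' heq
    rw [heq] at hA
    injection hA with h'
    subst h'
    split <;> simp_all

theorem runA_eq_alt (s e : String) : ∀ (n : ℕ) (xs : List String), xs.length ≤ n →
    runA s e false xs = get_intermediate_times_alt xs s e := by
  intro n
  induction n with
  | zero =>
    intro xs h
    have hnil : xs = [] := List.eq_nil_of_length_eq_zero (Nat.le_zero.mp h)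
    subst hnil
    rw [alt_none (show pvAfterFirst s [] = none from rfl)]
    simp [runA]
  | succ n ih =>
    intro xs hlen
    rw [runA_false]
    cases hA : pvAfterFirst s xs with
    | none => rw [alt_none hA]
    | some rest =>
      show runA s e true rest = get_intermediate_times_alt xs s e
      rw [runA_true]
      cases hS : pvSplitAtFirst e rest with
      | mk seg orest =>
        cases orest with
        | none =>
          rw [alt_some_none hA hS]
          simp
        | some r2 =>
          rw [alt_some_some hA hS]
          have h1 := pvAfterFirst_length hA
          have h2 := pvSplitAtFirst_length (x := e) (xs := rest) (by rw [hS])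
          show seg ++ runA s e false r2 = seg ++ get_intermediate_times_alt r2 s e
          rw [ih r2 (by omega)]

-- ===== VERDICT (by name: the statement is the Claim_ definition above) =====
theorem get_intermediate_times_spec : Claim_equal_get_intermediate_times := by
  intro all_times s e _
  unfold Spec_get_intermediate_times get_intermediate_times
  rw [show (fun (st : Bool × List String) time =>
        if st.1 then
          if time == e then (false, st.2) else (st.1, st.2 ++ [time])
        else if time == s then (true, st.2) else st) = fStep s e from rfl]
  rw [foldA_eq, List.nil_append, runA_eq_alt s e all_times.length all_times (le_refl _)]
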